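-- pv_equiv track=rewrite | github.com/Castro081/Compilador_1 | Analizador_IDE.py | validar_palabras_reservadas_consecutivas
-- ===== SOURCE A (Python) =====
-- def validar_palabras_reservadas_consecutivas(linea):
--     palabras_reservadas = ['int', 'double', 'char', 'public', 'private', 'if', 'main','while']
--     tokens = linea.split()
--     for i in range(len(tokens) - 1):
--         token_actual = tokens[i].lower()
--         token_siguiente = tokens[i + 1].lower()
--         if token_actual in palabras_reservadas and token_siguiente in palabras_reservadas:
--             return False
--     return True
-- ===== SOURCE B (Python) =====
-- def validar_palabras_reservadas_consecutivas(linea):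
--     palabras_reservadas = {'int', 'double', 'char', 'public', 'private', 'if', 'main', 'while'}
--     posiciones = [i for i, tok in enumerate(linea.split())
--                   if tok.lower() in palabras_reservadas]
--     return all(b - a != 1 for a, b in zip(posiciones, posiciones[1:]))
-- ===== Notes on version B (the rewrite author's own statement) =====
-- stated objective: alternative
-- what changed: B extracts the sorted index list of reserved tokens (enumerate + filter) and then decides the question on that index list alone, checking that no two successive reserved positions differ by exactly 1, instead of A's loop over all adjacent token pairs with two membership tests per step.
import Mathlib
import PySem

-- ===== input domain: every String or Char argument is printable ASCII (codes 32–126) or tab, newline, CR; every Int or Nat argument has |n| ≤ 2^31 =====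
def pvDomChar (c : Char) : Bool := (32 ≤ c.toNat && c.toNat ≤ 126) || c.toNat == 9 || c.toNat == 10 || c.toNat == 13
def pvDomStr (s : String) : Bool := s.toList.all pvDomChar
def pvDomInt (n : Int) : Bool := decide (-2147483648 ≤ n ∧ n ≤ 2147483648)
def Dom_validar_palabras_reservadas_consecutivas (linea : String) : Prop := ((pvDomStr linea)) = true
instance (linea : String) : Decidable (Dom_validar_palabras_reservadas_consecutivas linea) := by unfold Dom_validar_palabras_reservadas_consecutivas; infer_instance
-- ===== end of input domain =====

-- B computes the index list of reserved tokens and decides on that list alone (no gap of exactly 1); same cost, a different algorithmic object than A's pairwise token loop.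

-- ===== PORT A =====
def pvPalabrasReservadas : List String :=
  ["int", "double", "char", "public", "private", "if", "main", "while"]

-- the 'for i in range(len(tokens) - 1)' loop with its early 'return False'
def pvLoopA (tokens : List String) : List Int → Bool
  | [] => true
  | i :: rest =>
    let token_actual := PySem.Str.lower (PySem.List.pyGetD tokens i "")
    let token_siguiente := PySem.Str.lower (PySem.List.pyGetD tokens (i + 1) "")
    if token_actual ∈ pvPalabrasReservadas ∧ token_siguiente ∈ pvPalabrasReservadas then
      false
    else
      pvLoopA tokens rest

def validar_palabras_reservadas_consecutivas (linea : String) : Bool :=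
  let tokens := PySem.Str.split₀ linea
  pvLoopA tokens (PySem.List.pyRange 0 ((tokens.length : Int) - 1) 1)

-- ===== PORT B =====
-- posiciones = [i for i, tok in enumerate(linea.split()) if tok.lower() in palabras_reservadas]
-- return all(b - a != 1 for a, b in zip(posiciones, posiciones[1:]))
def validar_palabras_reservadas_consecutivas_alt (linea : String) : Bool :=
  let posiciones := ((PySem.List.enumerate (PySem.Str.split₀ linea)).filter
      (fun p => decide (PySem.Str.lower p.2 ∈ pvPalabrasReservadas))).map Prod.fst
  (posiciones.zip posiciones.tail).all (fun p => decide (p.2 - p.1 ≠ 1))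

-- ===== PRECONDITION & SPEC =====
def Spec_validar_palabras_reservadas_consecutivas (linea : String) (out : Bool) : Prop := out = validar_palabras_reservadas_consecutivas_alt linea
instance (linea : String) (out : Bool) : Decidable (Spec_validar_palabras_reservadas_consecutivas linea out) := by unfold Spec_validar_palabras_reservadas_consecutivas; infer_instance

-- ===== CLAIM =====
def Claim_equal_validar_palabras_reservadas_consecutivas : Prop := ∀ (linea : String), Dom_validar_palabras_reservadas_consecutivas linea → Spec_validar_palabras_reservadas_consecutivas linea (validar_palabras_reservadas_consecutivas linea)

-- ===== LEMMAS AND PROOFS =====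

-- the per-token reserved flag
def pvFlag (tok : String) : Bool := decide (PySem.Str.lower tok ∈ pvPalabrasReservadas)

-- A's answer expressed over the flag list (adjacent True pair check)
def pvAdjOk (flags : List Bool) : Bool :=
  !((flags.zip flags.tail).any (fun p => p.1 && p.2))

-- B's gap check over a position list
def pvGapOk (ps : List Int) : Bool :=
  (ps.zip ps.tail).all (fun p => decide (p.2 - p.1 ≠ 1))

-- B's position list, parametrised by the start index
def pvPosList (ts : List String) (s : Int) : List Int :=
  ((PySem.List.enumerate ts s).filter (fun p => decide (PySem.Str.lower p.2 ∈ pvPalabrasReservadas))).map Prod.fst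

lemma pvAdjOk_cons (a b : Bool) (rest : List Bool) :
    pvAdjOk (a :: b :: rest) = (!(a && b) && pvAdjOk (b :: rest)) := by
  simp [pvAdjOk, List.any_cons, Bool.not_or]

lemma pvGapOk_cons (a b : Int) (rest : List Int) :
    pvGapOk (a :: b :: rest) = (decide (b - a ≠ 1) && pvGapOk (b :: rest)) := by
  simp [pvGapOk, List.all_cons]

lemma pvPosList_cons (x : String) (ts : List String) (s : Int) :
    pvPosList (x :: ts) s =
      if pvFlag x then s :: pvPosList ts (s + 1) else pvPosList ts (s + 1) := by
  simp only [pvPosList, pvFlag, PySem.List.enumerate_cons, List.filter_cons]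
  by_cases h : PySem.Str.lower x ∈ pvPalabrasReservadas <;> simp [h]

lemma pvPosList_lb (ts : List String) (s : Int) : ∀ j ∈ pvPosList ts s, s ≤ j := by
  induction ts generalizing s with
  | nil => simp [pvPosList, PySem.List.enumerate_nil]
  | cons x ts ih =>
      intro j hj
      rw [pvPosList_cons] at hj
      by_cases hf : pvFlag x
      · simp only [hf, if_true, List.mem_cons] at hj
        rcases hj with rfl | hj
        · exact le_refl _
        · have := ih (s + 1) j hj; omega
      · simp only [hf, if_neg, Bool.false_eq_true, not_false_iff] at hj
        have := ih (s + 1) j hj; omega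

-- dropping a head position below every element of the tail by ≥ 2 does not affect the gap check
lemma pvGapOk_head_far (s : Int) (L : List Int) (h : ∀ j ∈ L, s + 2 ≤ j) :
    pvGapOk (s :: L) = pvGapOk L := by
  cases L with
  | nil => simp [pvGapOk]
  | cons j L' =>
      rw [pvGapOk_cons]
      have hj : s + 2 ≤ j := h j (by simp)
      have : (j - s ≠ 1) := by omega
      simp [this]

-- the key bridge: B's gap check on the position list equals the adjacent-flag check
lemma pvGapOk_posList (ts : List String) (s : Int) :
    pvGapOk (pvPosList ts s) = pvAdjOk (ts.map pvFlag) := by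
  induction ts generalizing s with
  | nil => simp [pvPosList, PySem.List.enumerate_nil, pvGapOk, pvAdjOk]
  | cons x ts ih =>
      cases ts with
      | nil =>
          rw [pvPosList_cons]
          by_cases hf : pvFlag x <;>
            simp [hf, pvPosList, PySem.List.enumerate_nil, pvGapOk, pvAdjOk]
      | cons y rest =>
          rw [pvPosList_cons]
          by_cases hx : pvFlag x
          · simp only [hx, if_true]
            rw [pvPosList_cons]
            by_cases hy : pvFlag y
            · simp only [hy, if_true]
              rw [pvGapOk_cons]
              have : ((s + 1 : Int) - s ≠ 1) = False := by simp
              simp only [List.map_cons, pvAdjOk_cons, hx, hy]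
              simp
            · simp only [hy, Bool.false_eq_true, if_false]
              rw [pvGapOk_head_far s _ (by
                intro j hj
                have := pvPosList_lb rest (s + 1 + 1) j hj
                omega)]
              have h1 := ih (s + 1)
              rw [pvPosList_cons, if_neg (by simp [hy])] at h1
              rw [h1]
              simp [List.map_cons, pvAdjOk_cons, hx, hy]
          · simp only [hx, Bool.false_eq_true, if_false]
            rw [ih (s + 1)]
            simp [List.map_cons, pvAdjOk_cons, hx]

-- A's index loop over a suffix equals the adjacent-flag check (invariant on the prefix)
lemma pvLoopA_eq (ts pre : List String) :
    pvLoopA (pre ++ ts)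
      (PySem.List.pyRange (pre.length : Int) ((pre.length : Int) + (ts.length : Int) - 1) 1)
      = pvAdjOk (ts.map pvFlag) := by
  induction ts generalizing pre with
  | nil =>
      rw [PySem.List.pyRange_one_eq_nil (by simp)]
      simp [pvLoopA, pvAdjOk]
  | cons x ts ih =>
      cases ts with
      | nil =>
          rw [PySem.List.pyRange_one_eq_nil (by simp)]
          simp [pvLoopA, pvAdjOk]
      | cons y rest =>
          have e : pre ++ x :: y :: rest = (pre ++ [x]) ++ y :: rest := by simp
          rw [PySem.List.pyRange_one_cons (by simp only [List.length_cons]; push_cast; omega)]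
          have h1 : PySem.List.pyGetD (pre ++ x :: y :: rest) (pre.length : Int) "" = x := by
            simp [PySem.List.pyGetD]
          have h2 : PySem.List.pyGetD (pre ++ x :: y :: rest) ((pre.length : Int) + 1) "" = y := by
            have hc : (pre.length : Int) + 1 = (((pre ++ [x]).length : Int)) := by
              simp only [List.length_append, List.length_cons, List.length_nil]; push_cast; omega
            have hp : PySem.List.pyGet? (pre ++ x :: y :: rest) ((pre.length : Int) + 1) = some y := by
              rw [e, hc]; exact PySem.List.pyGet?_append_length (pre ++ [x]) rest y
            simp [PySem.List.pyGetD, hp]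
          simp only [pvLoopA, h1, h2]
          have harg : (pre.length : Int) + 1 = ((pre ++ [x]).length : Int) := by
            simp only [List.length_append, List.length_cons, List.length_nil]; push_cast; omega
          have hend : (pre.length : Int) + ((x :: y :: rest).length : Int) - 1
              = ((pre ++ [x]).length : Int) + ((y :: rest).length : Int) - 1 := by
            simp only [List.length_append, List.length_cons, List.length_nil]; push_cast; omega
          rw [harg, hend, e, ih (pre ++ [x])]
          simp only [List.map_cons]
          rw [pvAdjOk_cons]
          by_cases hx : PySem.Str.lower x ∈ pvPalabrasReservadas <;>
            by_cases hy : PySem.Str.lower y ∈ pvPalabrasReservadas <;>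
            simp [pvFlag, hx, hy]

-- ===== VERDICT =====
theorem validar_palabras_reservadas_consecutivas_spec : Claim_equal_validar_palabras_reservadas_consecutivas := by
  intro linea _
  unfold Spec_validar_palabras_reservadas_consecutivas
  unfold validar_palabras_reservadas_consecutivas validar_palabras_reservadas_consecutivas_alt
  have hA := pvLoopA_eq (PySem.Str.split₀ linea) []
  simp only [List.nil_append, List.length_nil, Nat.cast_zero, zero_add] at hA
  have hB := pvGapOk_posList (PySem.Str.split₀ linea) 0
  simp only [pvPosList, pvGapOk] at hB
  rw [hA, ← hB]
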